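-- pv_equiv track=rewrite | github.com/IvanRodriguezSoria/UNAM-MyP | TurnLeft.py | orientation
-- ===== SOURCE A (Python) =====
-- def orientation (commands) :
--     """
--     Given a list of commands, returns an int, indicating the final
--     orientation of a recruit. That is, if the int is 3, the final
--     orientation is West (Avaible options are: [North, East, South, West]
--     [0, 1, 2, 3]).
--
--     commands    List of commands E and D.
--     """
--     final_orientation = 0
--     for command in commands :
--         if command == 'E' :
--             if final_orientation == 0 :
--                 final_orientation = 3
--             else :
--                 final_orientation -= 1
--         else :
--             if final_orientation == 3 :
--                 final_orientation = 0
--             else :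
--                 final_orientation += 1
--     return final_orientation
-- ===== SOURCE B (Python) =====
-- def orientation(commands):
--     """
--     Given a list of commands, returns an int, indicating the final
--     orientation of a recruit (0=North, 1=East, 2=South, 3=West).
--
--     commands    List of commands E and D.
--     """
--     lefts = commands.count('E')
--     return (len(commands) - 2 * lefts) % 4
-- ===== Notes on version B (the rewrite author's own statement) =====
-- stated objective: simpler
-- what changed: Replaces the per-element wraparound state machine with a closed form: count the 'E' commands once and return (len - 2*countE) % 4, with no per-step orientation update at all.
import Mathlib
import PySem

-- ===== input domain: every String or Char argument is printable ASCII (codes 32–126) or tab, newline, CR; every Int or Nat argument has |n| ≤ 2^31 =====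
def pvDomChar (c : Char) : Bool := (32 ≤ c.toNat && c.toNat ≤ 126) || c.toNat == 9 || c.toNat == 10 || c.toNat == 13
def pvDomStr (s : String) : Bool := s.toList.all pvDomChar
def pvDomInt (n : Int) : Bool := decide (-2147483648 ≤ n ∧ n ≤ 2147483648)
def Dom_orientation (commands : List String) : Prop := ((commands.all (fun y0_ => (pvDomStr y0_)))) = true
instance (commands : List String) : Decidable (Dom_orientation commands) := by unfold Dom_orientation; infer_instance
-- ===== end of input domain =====

-- B replaces A's per-element wraparound state machine with a closed form over one count: (len - 2*count('E')) % 4 (simpler, same cost).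

-- ===== PORT A =====
def orientation (commands : List String) : Int :=
  commands.foldl (fun fo command =>
    if command == "E" then
      (if fo == 0 then 3 else fo - 1)
    else
      (if fo == 3 then 0 else fo + 1)) 0

-- ===== PORT B =====
def orientation_alt (commands : List String) : Int :=
  PySem.Int.mod ((commands.length : Int) - 2 * (PySem.List.count commands "E" : Int)) 4

-- ===== PRECONDITION & SPEC =====
def Spec_orientation (commands : List String) (out : Int) : Prop := out = orientation_alt commands
instance (commands : List String) (out : Int) : Decidable (Spec_orientation commands out) := by unfold Spec_orientation; infer_instance

-- ===== CLAIM =====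
def Claim_equal_orientation : Prop := ∀ (commands : List String), Dom_orientation commands → Spec_orientation commands (orientation commands)

-- ===== LEMMAS AND PROOFS =====

-- Loop invariant: from any state 0 ≤ s < 4, A's fold ends at (s + len - 2*count('E')) mod 4.
theorem orientation_fold_eq (commands : List String) :
    ∀ s : Int, 0 ≤ s → s < 4 →
      commands.foldl (fun fo command =>
        if command == "E" then
          (if fo == 0 then 3 else fo - 1)
        else
          (if fo == 3 then 0 else fo + 1)) s
      = (s + (commands.length : Int) - 2 * (commands.count "E" : Int)) % 4 := by
  induction commands with
  | nil => intro s h0 h4; simp; omega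
  | cons c cs ih =>
    intro s h0 h4
    simp only [List.foldl_cons, List.length_cons, List.count_cons]
    by_cases hc : c == "E" <;> simp only [hc, if_true, if_false, Bool.false_eq_true] <;>
      split_ifs with h <;>
      · rw [ih _ (by simp_all <;> omega) (by simp_all <;> omega)]
        simp only [beq_iff_eq] at h ⊢
        push_cast
        omega

-- ===== VERDICT =====
theorem orientation_spec : Claim_equal_orientation := by
  intro commands _
  unfold Spec_orientation orientation orientation_alt
  rw [orientation_fold_eq commands 0 (by omega) (by omega),
      PySem.Int.mod_eq_emod_of_pos (by omega : (0:Int) < 4)]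
  simp [PySem.List.count]
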